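-- pv_equiv track=rewrite | github.com/hongyiheng/lc-base-on-doocs | Sliding Window/2555.Maximize Win From Two Segments/Solution.py | maximizeWin
-- ===== SOURCE A (Python) =====
-- from typing import List
--
-- def maximizeWin(prizePositions: List[int], k: int) -> int:
--     n = len(prizePositions)
--     f = [0] * (n + 1)
--     l = r = ans = 0
--     while r < n:
--         while prizePositions[r] - prizePositions[l] > k:
--             l += 1
--         f[r + 1] = max(f[r], r - l + 1)
--         ans = max(ans, r - l + 1 + f[l])
--         r += 1
--     return ans
-- ===== SOURCE B (Python) =====
-- from typing import List
--
-- def maximizeWin(prizePositions: List[int], k: int) -> int: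
--     n = len(prizePositions)
--     # pass 1: leftmost index of the window ending at each r (same pointer recurrence)
--     lefts = []
--     l = 0
--     for r in range(n):
--         while prizePositions[r] - prizePositions[l] > k:
--             l += 1
--         lefts.append(l)
--     # pass 2: lefts is non-decreasing, so a catch-up pointer t with one running
--     # maximum replaces the O(n) prefix-best array
--     ans = 0
--     running = 0  # max window length among windows ending before t
--     t = 0
--     for r in range(n):
--         while t < lefts[r]:
--             running = max(running, t - lefts[t] + 1)
--             t += 1
--         ans = max(ans, (r - lefts[r] + 1) + running)
--     return ans
-- ===== Notes on version B (the rewrite author's own statement) =====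
-- stated objective: alternative
-- what changed: A's fused loop maintains an O(n) prefix-best DP array f updated and indexed per element; B first records each window's left endpoint, then a second pass combines with a catch-up pointer and a single running maximum (exploiting that the left endpoints are non-decreasing), removing the DP array.
import Mathlib
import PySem

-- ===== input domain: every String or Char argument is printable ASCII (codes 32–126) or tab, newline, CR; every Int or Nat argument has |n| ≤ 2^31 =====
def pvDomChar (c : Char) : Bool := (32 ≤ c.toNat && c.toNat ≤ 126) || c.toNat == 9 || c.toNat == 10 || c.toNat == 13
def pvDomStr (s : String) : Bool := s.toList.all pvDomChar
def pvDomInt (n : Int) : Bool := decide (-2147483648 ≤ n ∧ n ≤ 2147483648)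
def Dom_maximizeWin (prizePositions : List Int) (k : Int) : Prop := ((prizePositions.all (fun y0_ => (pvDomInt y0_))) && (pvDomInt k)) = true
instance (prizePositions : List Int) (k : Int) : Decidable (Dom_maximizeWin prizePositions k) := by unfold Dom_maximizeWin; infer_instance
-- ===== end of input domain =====

-- B replaces A's prefix-best DP array f by a second catch-up-pointer pass with a single
-- running maximum (valid since the left endpoints are non-decreasing): same O(n) cost,
-- no DP array in the combining pass.

-- ===== PORT A =====
-- inner 'while prizePositions[r] - prizePositions[l] > k: l += 1'
-- (the 'none' branches are Python's IndexError path, unreachable inside Pre_)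
def advA (ps : List Int) (k : Int) (r l : Nat) : Nat :=
  match PySem.List.pyGet? ps (r : Int), h : PySem.List.pyGet? ps (l : Int) with
  | some pr, some pl => if pr - pl > k then advA ps k r (l + 1) else l
  | _, _ => l
termination_by ps.length - l
decreasing_by
  simp only [PySem.List.pyGet?_natCast] at h
  have hl := (List.getElem?_eq_some_iff.mp h).1
  omega

def maximizeWin (prizePositions : List Int) (k : Int) : Int :=
  let n := prizePositions.length
  (((List.range n).foldl
      (fun (s : Nat × List Int × Int) r =>
        let l := advA prizePositions k r s.1
        let w : Int := (r : Int) - (l : Int) + 1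
        let f := s.2.1.set (r + 1) (max (s.2.1.getD r 0) w)
        (l, f, max s.2.2 (w + f.getD l 0)))
      (0, List.replicate (n + 1) 0, 0))).2.2

-- ===== PORT B =====
-- the same inner while loop, in B's first pass
def advB (ps : List Int) (k : Int) (r l : Nat) : Nat :=
  match PySem.List.pyGet? ps (r : Int), h : PySem.List.pyGet? ps (l : Int) with
  | some pr, some pl => if pr - pl > k then advB ps k r (l + 1) else l
  | _, _ => l
termination_by ps.length - l
decreasing_by
  simp only [PySem.List.pyGet?_natCast] at h
  have hl := (List.getElem?_eq_some_iff.mp h).1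
  omega

-- 'while t < lefts[r]: running = max(running, t - lefts[t] + 1); t += 1'
def catchB (lefts : List Nat) (target t : Nat) (running : Int) : Nat × Int :=
  if t < target then
    catchB lefts target (t + 1) (max running ((t : Int) - (lefts.getD t 0 : Int) + 1))
  else (t, running)
termination_by target - t

def maximizeWin_alt (prizePositions : List Int) (k : Int) : Int :=
  let n := prizePositions.length
  let lefts := ((List.range n).foldl
      (fun (s : Nat × List Nat) r =>
        let l := advB prizePositions k r s.1
        (l, s.2 ++ [l]))
      (0, [])).2
  (((List.range n).foldl
      (fun (s : Nat × Int × Int) r =>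
        let lr := lefts.getD r 0
        let c := catchB lefts lr s.1 s.2.1
        (c.1, c.2, max s.2.2 (((r : Int) - (lr : Int) + 1) + c.2)))
      (0, 0, 0))).2.2

-- ===== PRECONDITION & SPEC =====
-- Pre_ excludes negative k on a nonempty list: there the final window scan always
-- runs past the end of the list and A raises IndexError (B's first pass raises too).
def Pre_maximizeWin (prizePositions : List Int) (k : Int) : Prop :=
  prizePositions = [] ∨ 0 ≤ k
instance (prizePositions : List Int) (k : Int) : Decidable (Pre_maximizeWin prizePositions k) := by
  unfold Pre_maximizeWin; infer_instance

def pvWitness_maximizeWin : List Int × Int := ([1, 1, 2, 2, 3, 3, 5], 2)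

def Spec_maximizeWin (prizePositions : List Int) (k : Int) (out : Int) : Prop := out = maximizeWin_alt prizePositions k
instance (prizePositions : List Int) (k : Int) (out : Int) : Decidable (Spec_maximizeWin prizePositions k out) := by unfold Spec_maximizeWin; infer_instance

-- ===== CLAIM (what is proved, stated in full; the proofs are below) =====
def Claim_equal_maximizeWin : Prop := ∀ (prizePositions : List Int) (k : Int), Dom_maximizeWin prizePositions k → Pre_maximizeWin prizePositions k → Spec_maximizeWin prizePositions k (maximizeWin prizePositions k)

-- ===== LEMMAS AND PROOFS =====

-- the mathematical left-pointer sequence, window length, prefix best, answer sequence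
def Lseq (ps : List Int) (k : Int) : Nat → Nat
  | 0 => advA ps k 0 0
  | r + 1 => advA ps k (r + 1) (Lseq ps k r)

def Lprev (ps : List Int) (k : Int) : Nat → Nat
  | 0 => 0
  | m + 1 => Lseq ps k m

def Wfn (ps : List Int) (k : Int) (r : Nat) : Int := (r : Int) - (Lseq ps k r : Int) + 1

def Ffn (ps : List Int) (k : Int) : Nat → Int
  | 0 => 0
  | j + 1 => max (Ffn ps k j) (Wfn ps k j)

def AnsSeq (ps : List Int) (k : Int) : Nat → Int
  | 0 => 0
  | m + 1 => max (AnsSeq ps k m) (Wfn ps k m + Ffn ps k (Lseq ps k m))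

-- unfolding equations for the two pointer-advance helpers
theorem advA_of_some (ps : List Int) (k : Int) (r l : Nat) (pr pl : Int)
    (h1 : PySem.List.pyGet? ps (r : Int) = some pr) (h2 : PySem.List.pyGet? ps (l : Int) = some pl) :
    advA ps k r l = if pr - pl > k then advA ps k r (l + 1) else l := by
  rw [advA.eq_def]
  split
  · rename_i pr' pl' h1' h2'
    rw [h1] at h1'; rw [h2] at h2'
    injection h1' with e1; injection h2' with e2
    rw [e1, e2]
  · rename_i hno
    exact absurd (hno pr pl (by rw [h1]) (by rw [h2])) (by simp)

theorem advA_of_none_l (ps : List Int) (k : Int) (r l : Nat)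
    (h2 : PySem.List.pyGet? ps (l : Int) = none) : advA ps k r l = l := by
  rw [advA.eq_def]
  split
  · rename_i pr' pl' h1' h2'; rw [h2] at h2'; cases h2'
  · rfl

theorem advA_of_none_r (ps : List Int) (k : Int) (r l : Nat)
    (h1 : PySem.List.pyGet? ps (r : Int) = none) : advA ps k r l = l := by
  rw [advA.eq_def]
  split
  · rename_i pr' pl' h1' h2'; rw [h1] at h1'; cases h1'
  · rfl

theorem advB_of_some (ps : List Int) (k : Int) (r l : Nat) (pr pl : Int)
    (h1 : PySem.List.pyGet? ps (r : Int) = some pr) (h2 : PySem.List.pyGet? ps (l : Int) = some pl) :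
    advB ps k r l = if pr - pl > k then advB ps k r (l + 1) else l := by
  rw [advB.eq_def]
  split
  · rename_i pr' pl' h1' h2'
    rw [h1] at h1'; rw [h2] at h2'
    injection h1' with e1; injection h2' with e2
    rw [e1, e2]
  · rename_i hno
    exact absurd (hno pr pl (by rw [h1]) (by rw [h2])) (by simp)

theorem advB_of_none_l (ps : List Int) (k : Int) (r l : Nat)
    (h2 : PySem.List.pyGet? ps (l : Int) = none) : advB ps k r l = l := by
  rw [advB.eq_def]
  split
  · rename_i pr' pl' h1' h2'; rw [h2] at h2'; cases h2'
  · rfl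

theorem advB_of_none_r (ps : List Int) (k : Int) (r l : Nat)
    (h1 : PySem.List.pyGet? ps (r : Int) = none) : advB ps k r l = l := by
  rw [advB.eq_def]
  split
  · rename_i pr' pl' h1' h2'; rw [h1] at h1'; cases h1'
  · rfl

theorem pyGet?_none_of_ge (ps : List Int) (l : Nat) (h : ps.length ≤ l) :
    PySem.List.pyGet? ps (l : Int) = none := by
  rw [PySem.List.pyGet?_natCast]
  exact List.getElem?_eq_none h

theorem lt_of_pyGet?_some (ps : List Int) (l : Nat) (pl : Int)
    (h : PySem.List.pyGet? ps (l : Int) = some pl) : l < ps.length := by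
  rw [PySem.List.pyGet?_natCast] at h
  exact (List.getElem?_eq_some_iff.mp h).1

theorem advB_eq_advA (ps : List Int) (k : Int) (r : Nat) :
    ∀ g l, ps.length - l ≤ g → advB ps k r l = advA ps k r l := by
  intro g
  induction g with
  | zero =>
    intro l hg
    have h2 := pyGet?_none_of_ge ps l (by omega)
    rw [advB_of_none_l ps k r l h2, advA_of_none_l ps k r l h2]
  | succ g ih =>
    intro l hg
    rcases h1 : PySem.List.pyGet? ps (r : Int) with _ | pr
    · rw [advB_of_none_r ps k r l h1, advA_of_none_r ps k r l h1]
    · rcases h2 : PySem.List.pyGet? ps (l : Int) with _ | pl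
      · rw [advB_of_none_l ps k r l h2, advA_of_none_l ps k r l h2]
      · rw [advB_of_some ps k r l pr pl h1 h2, advA_of_some ps k r l pr pl h1 h2]
        split
        · have hl := lt_of_pyGet?_some ps l pl h2
          exact ih (l + 1) (by omega)
        · rfl

theorem advA_ge (ps : List Int) (k : Int) (r : Nat) :
    ∀ g l, ps.length - l ≤ g → l ≤ advA ps k r l := by
  intro g
  induction g with
  | zero =>
    intro l hg
    rw [advA_of_none_l ps k r l (pyGet?_none_of_ge ps l (by omega))]
  | succ g ih =>
    intro l hg
    rcases h1 : PySem.List.pyGet? ps (r : Int) with _ | pr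
    · rw [advA_of_none_r ps k r l h1]
    · rcases h2 : PySem.List.pyGet? ps (l : Int) with _ | pl
      · rw [advA_of_none_l ps k r l h2]
      · rw [advA_of_some ps k r l pr pl h1 h2]
        split
        · have hl := lt_of_pyGet?_some ps l pl h2
          have := ih (l + 1) (by omega)
          omega
        · exact le_rfl

theorem advA_le (ps : List Int) (k : Int) (r : Nat) (hk : 0 ≤ k) :
    ∀ g l, ps.length - l ≤ g → l ≤ r → advA ps k r l ≤ r := by
  intro g
  induction g with
  | zero =>
    intro l hg hlr
    rw [advA_of_none_l ps k r l (pyGet?_none_of_ge ps l (by omega))]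
    exact hlr
  | succ g ih =>
    intro l hg hlr
    rcases h1 : PySem.List.pyGet? ps (r : Int) with _ | pr
    · rw [advA_of_none_r ps k r l h1]; exact hlr
    · rcases h2 : PySem.List.pyGet? ps (l : Int) with _ | pl
      · rw [advA_of_none_l ps k r l h2]; exact hlr
      · rw [advA_of_some ps k r l pr pl h1 h2]
        split
        · rename_i hc
          have hl := lt_of_pyGet?_some ps l pl h2
          rcases Nat.lt_or_ge l r with h | h
          · exact ih (l + 1) (by omega) (by omega)
          · have : l = r := by omega
            subst this
            rw [h1] at h2
            have : pr = pl := by injection h2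
            omega
        · exact hlr

theorem Lseq_le (ps : List Int) (k : Int) (hk : 0 ≤ k) (r : Nat) : Lseq ps k r ≤ r := by
  induction r with
  | zero => exact advA_le ps k 0 hk ps.length 0 (by omega) le_rfl
  | succ r ih => exact advA_le ps k (r + 1) hk ps.length (Lseq ps k r) (by omega) (by omega)

theorem Lseq_mono (ps : List Int) (k : Int) (r : Nat) : Lseq ps k r ≤ Lseq ps k (r + 1) :=
  advA_ge ps k (r + 1) ps.length (Lseq ps k r) (by omega)

theorem Lprev_le_Lseq (ps : List Int) (k : Int) (m : Nat) : Lprev ps k m ≤ Lseq ps k m := by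
  cases m with
  | zero => exact advA_ge ps k 0 ps.length 0 (by omega)
  | succ m => exact Lseq_mono ps k m

theorem Lprev_step (ps : List Int) (k : Int) (m : Nat) :
    advA ps k m (Lprev ps k m) = Lseq ps k m := by
  cases m with
  | zero => rfl
  | succ m => rfl

-- A's DP table after m iterations
def fTab (ps : List Int) (k : Int) (n m : Nat) : List Int :=
  (List.range (n + 1)).map (fun j => if j ≤ m then Ffn ps k j else 0)

theorem fTab_zero (ps : List Int) (k : Int) (n : Nat) :
    fTab ps k n 0 = List.replicate (n + 1) 0 := by
  apply List.ext_getElem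
  · simp [fTab]
  · intro j h1 h2
    simp [fTab] at h1 ⊢
    rcases Nat.eq_zero_or_pos j with h | h
    · subst h; simp [Ffn]
    · simp [Nat.pos_iff_ne_zero.mp h]

theorem fTab_getD (ps : List Int) (k : Int) (n m j : Nat) (hj : j ≤ n) (hjm : j ≤ m) :
    (fTab ps k n m).getD j 0 = Ffn ps k j := by
  rw [List.getD_eq_getElem _ _ (by simp [fTab]; omega)]
  simp [fTab, hjm]

theorem fTab_set (ps : List Int) (k : Int) (n m : Nat) (hm : m < n) :
    (fTab ps k n m).set (m + 1) (max ((fTab ps k n m).getD m 0) (Wfn ps k m)) =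
      fTab ps k n (m + 1) := by
  rw [fTab_getD ps k n m m (by omega) le_rfl]
  apply List.ext_getElem
  · simp [fTab]
  · intro j h1 h2
    rw [List.getElem_set]
    by_cases h : m + 1 = j
    · rw [if_pos h]
      subst h
      have hb : m + 1 < n + 1 := by omega
      simp only [fTab, List.getElem_map, List.getElem_range]
      rw [if_pos le_rfl]
      rfl
    · rw [if_neg h]
      simp only [fTab, List.getElem_map, List.getElem_range]
      by_cases hj2 : j ≤ m
      · rw [if_pos hj2, if_pos (by omega)]
      · rw [if_neg hj2, if_neg (by omega)]

-- A's whole loop: state after m iterations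
theorem A_fold (ps : List Int) (k : Int) (hk : 0 ≤ k) (m : Nat) (hm : m ≤ ps.length) :
    (List.range m).foldl
      (fun (s : Nat × List Int × Int) r =>
        let l := advA ps k r s.1
        let w : Int := (r : Int) - (l : Int) + 1
        let f := s.2.1.set (r + 1) (max (s.2.1.getD r 0) w)
        (l, f, max s.2.2 (w + f.getD l 0)))
      (0, List.replicate (ps.length + 1) 0, 0)
      = (Lprev ps k m, fTab ps k ps.length m, AnsSeq ps k m) := by
  induction m with
  | zero => simp [Lprev, AnsSeq, fTab_zero]
  | succ m ih =>
    rw [List.range_succ, List.foldl_append, ih (by omega)]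
    simp only [List.foldl_cons, List.foldl_nil, Lprev_step]
    rw [show ((m : Int) - (Lseq ps k m : Int) + 1) = Wfn ps k m from rfl]
    rw [fTab_set ps k ps.length m (by omega)]
    rw [fTab_getD ps k ps.length (m + 1) (Lseq ps k m)
        (le_trans (Lseq_le ps k hk m) (by omega)) (le_trans (Lseq_le ps k hk m) (by omega))]
    simp [Lprev, AnsSeq, Wfn]

-- B's first pass builds the map of Lseq
theorem B_lefts (ps : List Int) (k : Int) (m : Nat) :
    (List.range m).foldl
      (fun (s : Nat × List Nat) r =>
        let l := advB ps k r s.1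
        (l, s.2 ++ [l]))
      (0, [])
      = (Lprev ps k m, (List.range m).map (Lseq ps k)) := by
  induction m with
  | zero => simp [Lprev]
  | succ m ih =>
    rw [List.range_succ, List.foldl_append, ih]
    have h : advB ps k m (Lprev ps k m) = Lseq ps k m := by
      rw [advB_eq_advA ps k m ps.length (Lprev ps k m) (by omega), Lprev_step]
    simp only [List.foldl_cons, List.foldl_nil, h]
    simp [Lprev]

theorem lefts_getD (ps : List Int) (k : Int) (n r : Nat) (hr : r < n) :
    ((List.range n).map (Lseq ps k)).getD r 0 = Lseq ps k r := by
  rw [List.getD_eq_getElem _ _ (by simpa using hr)]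
  simp

-- B's catch-up pointer computes the prefix best
theorem catchB_spec (ps : List Int) (k : Int) (n target : Nat) (htar : target ≤ n) :
    ∀ g t, target - t ≤ g → t ≤ target →
      catchB ((List.range n).map (Lseq ps k)) target t (Ffn ps k t) = (target, Ffn ps k target) := by
  intro g
  induction g with
  | zero =>
    intro t hg ht
    have : t = target := by omega
    subst this
    rw [catchB]
    simp
  | succ g ih =>
    intro t hg ht
    rw [catchB]
    rcases Nat.lt_or_ge t target with hc | hc
    · rw [if_pos hc]
      rw [lefts_getD ps k n t (by omega)]
      have heq : max (Ffn ps k t) ((t : Int) - (Lseq ps k t : Int) + 1) = Ffn ps k (t + 1) := by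
        simp [Ffn, Wfn]
      rw [heq]
      exact ih (t + 1) (by omega) (by omega)
    · rw [if_neg (by omega)]
      have : t = target := by omega
      rw [this]

-- B's second pass: state after m iterations
theorem B_fold (ps : List Int) (k : Int) (hk : 0 ≤ k) (m : Nat) (hm : m ≤ ps.length) :
    (List.range m).foldl
      (fun (s : Nat × Int × Int) r =>
        let lr := ((List.range ps.length).map (Lseq ps k)).getD r 0
        let c := catchB ((List.range ps.length).map (Lseq ps k)) lr s.1 s.2.1
        (c.1, c.2, max s.2.2 (((r : Int) - (lr : Int) + 1) + c.2)))
      (0, 0, 0)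
      = (Lprev ps k m, Ffn ps k (Lprev ps k m), AnsSeq ps k m) := by
  induction m with
  | zero => simp [Lprev, Ffn, AnsSeq]
  | succ m ih =>
    rw [List.range_succ, List.foldl_append, ih (by omega)]
    simp only [List.foldl_cons, List.foldl_nil]
    rw [lefts_getD ps k ps.length m (by omega)]
    rw [catchB_spec ps k ps.length (Lseq ps k m)
        (le_trans (Lseq_le ps k hk m) (by omega)) (Lseq ps k m) (Lprev ps k m)
        (by omega) (Lprev_le_Lseq ps k m)]
    simp [Lprev, AnsSeq, Wfn]

-- ===== VERDICT (by name: the statement is the Claim_ definition above) =====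
theorem maximizeWin_spec : Claim_equal_maximizeWin := by
  intro ps k _ hpre
  unfold Spec_maximizeWin maximizeWin maximizeWin_alt
  rcases hpre with h | hk
  · subst h; rfl
  · simp only [A_fold ps k hk ps.length le_rfl, B_lefts ps k ps.length,
      B_fold ps k hk ps.length le_rfl]
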